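-- pv_equiv track=rewrite | github.com/Noureddine-1954/A-Maze-ing | ft_parsing.py | ftwo_cells
-- ===== SOURCE A (Python) =====
-- def ftwo_cells(height: int, width: int) -> set[tuple[int, int]]:
--     """abgherbvj"""
--     if width < 10 or height < 7:
--         return set()
--
--     four = [
--         [0, 1, 0, 1, 0],
--         [0, 1, 0, 1, 0],
--         [0, 1, 1, 1, 0],
--         [0, 0, 0, 1, 0],
--         [0, 0, 0, 1, 0],
--     ]
--     two = [
--         [0, 1, 1, 1, 0],
--         [0, 0, 0, 1, 0],
--         [0, 1, 1, 1, 0],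
--         [0, 1, 0, 0, 0],
--         [0, 1, 1, 1, 0],
--     ]
--
--     row_offset = height // 2 - 2
--     col_offset = width // 2 - 5
--     cells = set()
--
--     for r, row in enumerate(four):
--         for c, val in enumerate(row):
--             if val:
--                 cells.add((row_offset + r, col_offset + c))
--
--     for r, row in enumerate(two):
--         for c, val in enumerate(row):
--             if val:
--                 cells.add((row_offset + r, col_offset + 5 + c))
--
--     return cells
-- ===== SOURCE B (Python) =====
-- # Seven-segment renderer: each digit of "42" is drawn from its segment set by a
-- # per-pixel geometric coverage test, instead of scanning hard-coded 0/1 bitmaps.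
-- SEGMENTS = {
--     '4': ('tl', 'tr', 'mid', 'br'),
--     '2': ('top', 'tr', 'mid', 'bl', 'bot'),
-- }
--
--
-- def _seg_covers(seg, r, c):
--     if seg == 'top':
--         return r == 0 and 1 <= c <= 3
--     if seg == 'mid':
--         return r == 2 and 1 <= c <= 3
--     if seg == 'bot':
--         return r == 4 and 1 <= c <= 3
--     if seg == 'tl':
--         return c == 1 and r <= 1
--     if seg == 'tr':
--         return c == 3 and r <= 1
--     if seg == 'bl':
--         return c == 1 and r >= 3
--     if seg == 'br':
--         return c == 3 and r >= 3
--     return False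
--
--
-- def ftwo_cells(height: int, width: int) -> set[tuple[int, int]]:
--     if width < 10 or height < 7:
--         return set()
--     ro = height // 2 - 2
--     co = width // 2 - 5
--     cells = set()
--     for i, digit in enumerate("42"):
--         segs = SEGMENTS[digit]
--         for r in range(5):
--             for c in range(5):
--                 if any(_seg_covers(s, r, c) for s in segs):
--                     cells.add((ro + r, co + 5 * i + c))
--     return cells
-- ===== Notes on version B (the rewrite author's own statement) =====
-- stated objective: alternative
-- what changed: Replaces the hard-coded 5x5 0/1 bitmaps with a seven-segment renderer: each digit of "42" is mapped to its set of display segments and every pixel is decided by a geometric segment-coverage predicate instead of a table lookup.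
import Mathlib
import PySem

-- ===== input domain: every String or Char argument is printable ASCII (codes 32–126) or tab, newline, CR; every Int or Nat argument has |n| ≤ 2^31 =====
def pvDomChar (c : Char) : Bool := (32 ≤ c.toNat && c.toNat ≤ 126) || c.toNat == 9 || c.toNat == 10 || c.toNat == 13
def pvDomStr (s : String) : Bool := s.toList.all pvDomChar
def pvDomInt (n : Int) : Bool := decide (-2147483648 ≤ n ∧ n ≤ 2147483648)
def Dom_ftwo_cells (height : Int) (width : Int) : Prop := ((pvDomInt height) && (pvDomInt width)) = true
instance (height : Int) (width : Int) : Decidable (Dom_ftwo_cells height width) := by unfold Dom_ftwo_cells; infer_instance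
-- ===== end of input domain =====

-- B renders each digit of "42" with a seven-segment coverage predicate instead of
-- scanning hard-coded 0/1 bitmaps (alternative algorithm, same O(1) cost).
-- ===== PORT A =====
def ftwo_cells (height : Int) (width : Int) : List (Int × Int) :=
  if width < 10 ∨ height < 7 then PySem.Set.empty
  else
    let four : List (List Int) :=
      [[0, 1, 0, 1, 0],
       [0, 1, 0, 1, 0],
       [0, 1, 1, 1, 0],
       [0, 0, 0, 1, 0],
       [0, 0, 0, 1, 0]]
    let two : List (List Int) :=
      [[0, 1, 1, 1, 0],
       [0, 0, 0, 1, 0],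
       [0, 1, 1, 1, 0],
       [0, 1, 0, 0, 0],
       [0, 1, 1, 1, 0]]
    let row_offset := PySem.Int.floordiv height 2 - 2
    let col_offset := PySem.Int.floordiv width 2 - 5
    let cells : PySem.Set (Int × Int) := PySem.Set.empty
    let cells := (PySem.List.enumerate four).foldl (fun cells rrow =>
      (PySem.List.enumerate rrow.2).foldl (fun cells cval =>
        if cval.2 ≠ 0 then PySem.Set.add cells (row_offset + rrow.1, col_offset + cval.1)
        else cells) cells) cells
    let cells := (PySem.List.enumerate two).foldl (fun cells rrow =>
      (PySem.List.enumerate rrow.2).foldl (fun cells cval =>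
        if cval.2 ≠ 0 then PySem.Set.add cells (row_offset + rrow.1, col_offset + 5 + cval.1)
        else cells) cells) cells
    cells

-- ===== PORT B =====
def pvSEGMENTS : PySem.Dict Char (List String) :=
  PySem.Dict.ofList
    [('4', ["tl", "tr", "mid", "br"]),
     ('2', ["top", "tr", "mid", "bl", "bot"])]

def pvSegCovers (seg : String) (r : Int) (c : Int) : Bool :=
  if seg = "top" then decide (r = 0 ∧ 1 ≤ c ∧ c ≤ 3)
  else if seg = "mid" then decide (r = 2 ∧ 1 ≤ c ∧ c ≤ 3)
  else if seg = "bot" then decide (r = 4 ∧ 1 ≤ c ∧ c ≤ 3)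
  else if seg = "tl" then decide (c = 1 ∧ r ≤ 1)
  else if seg = "tr" then decide (c = 3 ∧ r ≤ 1)
  else if seg = "bl" then decide (c = 1 ∧ 3 ≤ r)
  else if seg = "br" then decide (c = 3 ∧ 3 ≤ r)
  else false

def ftwo_cells_alt (height : Int) (width : Int) : List (Int × Int) :=
  if width < 10 ∨ height < 7 then PySem.Set.empty
  else
    let ro := PySem.Int.floordiv height 2 - 2
    let co := PySem.Int.floordiv width 2 - 5
    -- SEGMENTS[digit] always succeeds for the digits of "42"; getD [] is exact here.
    (PySem.List.enumerate "42".toList).foldl (fun cells idig =>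
      let segs := PySem.Dict.getD pvSEGMENTS idig.2 []
      (PySem.List.pyRange 0 5 1).foldl (fun cells r =>
        (PySem.List.pyRange 0 5 1).foldl (fun cells c =>
          if segs.any (fun s => pvSegCovers s r c) then
            PySem.Set.add cells (ro + r, co + 5 * idig.1 + c)
          else cells) cells) cells) PySem.Set.empty

-- ===== PRECONDITION & SPEC =====
def Spec_ftwo_cells (height : Int) (width : Int) (out : List (Int × Int)) : Prop := out = ftwo_cells_alt height width
instance (height : Int) (width : Int) (out : List (Int × Int)) : Decidable (Spec_ftwo_cells height width out) := by unfold Spec_ftwo_cells; infer_instance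

-- ===== CLAIM =====
def Claim_equal_ftwo_cells : Prop := ∀ (height : Int) (width : Int), Dom_ftwo_cells height width → Spec_ftwo_cells height width (ftwo_cells height width)

-- ===== LEMMAS AND PROOFS =====
theorem pvRange5 : PySem.List.pyRange 0 5 1 = [0, 1, 2, 3, 4] := by decide
theorem pvEnum42 : PySem.List.enumerate "42".toList = [((0 : Int), '4'), (1, '2')] := by decide
theorem pvSeg4 : PySem.Dict.getD pvSEGMENTS '4' [] = ["tl", "tr", "mid", "br"] := by decide
theorem pvSeg2 : PySem.Dict.getD pvSEGMENTS '2' [] = ["top", "tr", "mid", "bl", "bot"] := by decide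
-- pvSegCovers on a literal segment name reduces definitionally:
theorem pvCov_top (r c : Int) : pvSegCovers "top" r c = decide (r = 0 ∧ 1 ≤ c ∧ c ≤ 3) := rfl
theorem pvCov_mid (r c : Int) : pvSegCovers "mid" r c = decide (r = 2 ∧ 1 ≤ c ∧ c ≤ 3) := rfl
theorem pvCov_bot (r c : Int) : pvSegCovers "bot" r c = decide (r = 4 ∧ 1 ≤ c ∧ c ≤ 3) := rfl
theorem pvCov_tl (r c : Int) : pvSegCovers "tl" r c = decide (c = 1 ∧ r ≤ 1) := rfl
theorem pvCov_tr (r c : Int) : pvSegCovers "tr" r c = decide (c = 3 ∧ r ≤ 1) := rfl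
theorem pvCov_bl (r c : Int) : pvSegCovers "bl" r c = decide (c = 1 ∧ 3 ≤ r) := rfl
theorem pvCov_br (r c : Int) : pvSegCovers "br" r c = decide (c = 3 ∧ 3 ≤ r) := rfl
-- the 20 filled cells at offset (ro, co), in both programs' insertion order
def pvCells (ro co : Int) : List (Int × Int) :=
  [(ro, co + 1), (ro, co + 3), (ro + 1, co + 1), (ro + 1, co + 3), (ro + 2, co + 1),
   (ro + 2, co + 2), (ro + 2, co + 3), (ro + 3, co + 3), (ro + 4, co + 3),
   (ro, co + 6), (ro, co + 7), (ro, co + 8), (ro + 1, co + 8), (ro + 2, co + 6),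
   (ro + 2, co + 7), (ro + 2, co + 8), (ro + 3, co + 6), (ro + 4, co + 6),
   (ro + 4, co + 7), (ro + 4, co + 8)]

-- B's inner double loop for digit '4' (glyph index 0), with an opaque accumulator
set_option maxHeartbeats 1000000 in
theorem pvChainB4 (ro co : Int) (acc : PySem.Set (Int × Int)) :
    ([(0:Int),1,2,3,4]).foldl (fun cells r =>
      ([(0:Int),1,2,3,4]).foldl (fun cells c =>
        if (PySem.Dict.getD pvSEGMENTS '4' []).any (fun s => pvSegCovers s r c) then
          PySem.Set.add cells (ro + r, co + 5 * (0:Int) + c)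
        else cells) cells) acc
    = (PySem.Set.add (PySem.Set.add (PySem.Set.add (PySem.Set.add (PySem.Set.add (PySem.Set.add (PySem.Set.add (PySem.Set.add (PySem.Set.add acc (ro, co + 1)) (ro, co + 3)) ((ro + 1), co + 1)) ((ro + 1), co + 3)) ((ro + 2), co + 1)) ((ro + 2), co + 2)) ((ro + 2), co + 3)) ((ro + 3), co + 3)) ((ro + 4), co + 3)) := by
  norm_num [pvSeg4, pvCov_top, pvCov_mid, pvCov_bot, pvCov_tl, pvCov_tr, pvCov_bl,
    pvCov_br, List.foldl_cons, List.foldl_nil, List.any_cons, List.any_nil]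

-- B's inner double loop for digit '2' (glyph index 1)
set_option maxHeartbeats 1000000 in
theorem pvChainB2 (ro co : Int) (acc : PySem.Set (Int × Int)) :
    ([(0:Int),1,2,3,4]).foldl (fun cells r =>
      ([(0:Int),1,2,3,4]).foldl (fun cells c =>
        if (PySem.Dict.getD pvSEGMENTS '2' []).any (fun s => pvSegCovers s r c) then
          PySem.Set.add cells (ro + r, co + 5 * (1:Int) + c)
        else cells) cells) acc
    = (PySem.Set.add (PySem.Set.add (PySem.Set.add (PySem.Set.add (PySem.Set.add (PySem.Set.add (PySem.Set.add (PySem.Set.add (PySem.Set.add (PySem.Set.add (PySem.Set.add acc (ro, co + 6)) (ro, co + 7)) (ro, co + 8)) ((ro + 1), co + 8)) ((ro + 2), co + 6)) ((ro + 2), co + 7)) ((ro + 2), co + 8)) ((ro + 3), co + 6)) ((ro + 4), co + 6)) ((ro + 4), co + 7)) ((ro + 4), co + 8)) := by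
  norm_num [pvSeg2, pvCov_top, pvCov_mid, pvCov_bot, pvCov_tl, pvCov_tr, pvCov_bl,
    pvCov_br, List.foldl_cons, List.foldl_nil, List.any_cons, List.any_nil, add_assoc]

-- A's double loop over the '4' bitmap, with an opaque accumulator
set_option maxHeartbeats 1000000 in
theorem pvChainA4 (ro co : Int) (acc : PySem.Set (Int × Int)) :
    (PySem.List.enumerate ([[0, 1, 0, 1, 0], [0, 1, 0, 1, 0], [0, 1, 1, 1, 0],
        [0, 0, 0, 1, 0], [0, 0, 0, 1, 0]] : List (List Int))).foldl (fun cells rrow =>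
      (PySem.List.enumerate rrow.2).foldl (fun cells cval =>
        if cval.2 ≠ 0 then PySem.Set.add cells (ro + rrow.1, co + cval.1)
        else cells) cells) acc
    = (PySem.Set.add (PySem.Set.add (PySem.Set.add (PySem.Set.add (PySem.Set.add (PySem.Set.add (PySem.Set.add (PySem.Set.add (PySem.Set.add acc (ro, co + 1)) (ro, co + 3)) ((ro + 1), co + 1)) ((ro + 1), co + 3)) ((ro + 2), co + 1)) ((ro + 2), co + 2)) ((ro + 2), co + 3)) ((ro + 3), co + 3)) ((ro + 4), co + 3)) := by
  norm_num [PySem.List.enumerate_cons, PySem.List.enumerate_nil,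
    List.foldl_cons, List.foldl_nil]

-- A's double loop over the '2' bitmap (columns shifted by 5)
set_option maxHeartbeats 1000000 in
theorem pvChainA2 (ro co : Int) (acc : PySem.Set (Int × Int)) :
    (PySem.List.enumerate ([[0, 1, 1, 1, 0], [0, 0, 0, 1, 0], [0, 1, 1, 1, 0],
        [0, 1, 0, 0, 0], [0, 1, 1, 1, 0]] : List (List Int))).foldl (fun cells rrow =>
      (PySem.List.enumerate rrow.2).foldl (fun cells cval =>
        if cval.2 ≠ 0 then PySem.Set.add cells (ro + rrow.1, co + 5 + cval.1)
        else cells) cells) acc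
    = (PySem.Set.add (PySem.Set.add (PySem.Set.add (PySem.Set.add (PySem.Set.add (PySem.Set.add (PySem.Set.add (PySem.Set.add (PySem.Set.add (PySem.Set.add (PySem.Set.add acc (ro, co + 6)) (ro, co + 7)) (ro, co + 8)) ((ro + 1), co + 8)) ((ro + 2), co + 6)) ((ro + 2), co + 7)) ((ro + 2), co + 8)) ((ro + 3), co + 6)) ((ro + 4), co + 6)) ((ro + 4), co + 7)) ((ro + 4), co + 8)) := by
  norm_num [PySem.List.enumerate_cons, PySem.List.enumerate_nil,
    List.foldl_cons, List.foldl_nil, add_assoc]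

-- the shared 20-step add-chain is Set.ofList of the cell list, which is Nodup
theorem pvCells_nodup (ro co : Int) : (pvCells ro co).Nodup := by
  simp only [pvCells, List.nodup_cons, List.mem_cons, List.not_mem_nil, Prod.mk.injEq,
    not_or, List.nodup_nil, and_true, not_and]
  norm_num

set_option maxHeartbeats 1000000 in
theorem pvChainList (ro co : Int) :
    (PySem.Set.add (PySem.Set.add (PySem.Set.add (PySem.Set.add (PySem.Set.add (PySem.Set.add (PySem.Set.add (PySem.Set.add (PySem.Set.add (PySem.Set.add (PySem.Set.add (PySem.Set.add (PySem.Set.add (PySem.Set.add (PySem.Set.add (PySem.Set.add (PySem.Set.add (PySem.Set.add (PySem.Set.add (PySem.Set.add (PySem.Set.empty : PySem.Set (Int × Int)) (ro, co + 1)) (ro, co + 3)) ((ro + 1), co + 1)) ((ro + 1), co + 3)) ((ro + 2), co + 1)) ((ro + 2), co + 2)) ((ro + 2), co + 3)) ((ro + 3), co + 3)) ((ro + 4), co + 3)) (ro, co + 6)) (ro, co + 7)) (ro, co + 8)) ((ro + 1), co + 8)) ((ro + 2), co + 6)) ((ro + 2), co + 7)) ((ro + 2), co + 8)) ((ro + 3),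 co + 6)) ((ro + 4), co + 6)) ((ro + 4), co + 7)) ((ro + 4), co + 8)) = pvCells ro co := by
  have h : (PySem.Set.add (PySem.Set.add (PySem.Set.add (PySem.Set.add (PySem.Set.add (PySem.Set.add (PySem.Set.add (PySem.Set.add (PySem.Set.add (PySem.Set.add (PySem.Set.add (PySem.Set.add (PySem.Set.add (PySem.Set.add (PySem.Set.add (PySem.Set.add (PySem.Set.add (PySem.Set.add (PySem.Set.add (PySem.Set.add (PySem.Set.empty : PySem.Set (Int × Int)) (ro, co + 1)) (ro, co + 3)) ((ro + 1), co + 1)) ((ro + 1), co + 3)) ((ro + 2), co + 1)) ((ro + 2), co + 2)) ((ro + 2), co + 3)) ((ro + 3), co + 3)) ((ro + 4), co + 3)) (ro, co + 6)) (ro, co + 7)) (ro, co + 8)) ((ro + 1), co + 8)) ((ro + 2), co + 6)) ((ro + 2), co + 7)) ((ro + 2), co + 8)) ((ro + 3), co + 6)) ((ro + 4), co + 6)) ((ro + 4), co + 7)) ((ro + 4), co + 8)) = PySem.Set.ofList (pvCells ro co) := by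
    rw [PySem.Set.ofList_eq_foldl]
    simp only [pvCells, List.foldl_cons, List.foldl_nil]
    rfl
  rw [h]
  exact PySem.Set.ofList_eq_self_of_nodup _ (pvCells_nodup ro co)

-- ===== VERDICT =====
set_option maxHeartbeats 1000000 in
theorem ftwo_cells_spec : Claim_equal_ftwo_cells := by
  intro height width _
  unfold Spec_ftwo_cells ftwo_cells ftwo_cells_alt
  by_cases h : width < 10 ∨ height < 7
  · rw [if_pos h, if_pos h]
  · simp only [if_neg h]
    generalize PySem.Int.floordiv height 2 - 2 = ro
    generalize PySem.Int.floordiv width 2 - 5 = co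
    rw [pvChainA4, pvChainA2, pvEnum42]
    simp only [List.foldl_cons, List.foldl_nil]
    rw [pvRange5, pvChainB4, pvChainB2, pvChainList]
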